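-- pv_equiv track=rewrite | github.com/music-computing/amads | amads/core/vector_transforms_checks.py | rotation_distinct_patterns
-- ===== SOURCE A (Python) =====
-- def is_rotation_equivalent(a: tuple, b: tuple) -> bool:
--     """
--     Test for rotation equivalence.
--     This is applicable to indicator vectors, interval sequences, and more
--     (any tuple, list, or even string).
--
--     Examples
--     --------
--
--     Indicator:
--
--     >>> is_rotation_equivalent((1, 0, 0), (0, 1, 0))
--     True
--
--     >>> is_rotation_equivalent((1, 0, 0), (1, 1, 0))
--     False
--
--     Intervals:
--
--     >>> is_rotation_equivalent((3, 3, 2), (3, 2, 3))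
--     True
--
--     >>> is_rotation_equivalent((3, 3, 2), (2, 3, 2))
--     False
--
--     Trivial case:
--     >>> is_rotation_equivalent((1, 0, 0), (1, 0, 0))
--     True
--
--     """
--     if len(a) != len(b):
--         raise ValueError("The vectors must be of the same length.")
--
--     doubled = b + b
--     return len(a) == 0 or any(
--         doubled[i : i + len(a)] == a for i in range(len(b))
--     )
--
-- def rotation_distinct_patterns(
--     vector_patterns: tuple[tuple, ...]
-- ) -> tuple[tuple, ...]:
--     """
--     Given two or more vectors of the same length,
--     test rotation equivalence among them.
--     Return the list of rotation distinct pattens: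
--     the returned patterns are not rotation equivalent to each other,
--     but all tested rhythms (in the argument) are rotation equivalent
--     to one of those returned patterns.
--
--     Examples
--     --------
--     Here are ten canonical 12-unit bell pattern rhythms:
--
--     >>> Soli = (2, 2, 2, 2, 1, 2, 1)
--     >>> Tambú = (2, 2, 2, 1, 2, 2, 1)
--     >>> Bembé = (2, 2, 1, 2, 2, 2, 1)
--     >>> Bembé_2 = (1, 2, 2, 1, 2, 2, 2)
--     >>> Yoruba = (2, 2, 1, 2, 2, 1, 2)
--     >>> Tonada = (2, 1, 2, 1, 2, 2, 2)
--     >>> Asaadua = (2, 2, 2, 1, 2, 1, 2)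
--     >>> Sorsonet = (1, 1, 2, 2, 2, 2, 2)
--     >>> Bemba = (2, 1, 2, 2, 2, 1, 2)
--     >>> Ashanti = (2, 1, 2, 2, 1, 2, 2)
--     >>> ten_tuples = (Asaadua, Ashanti, Bemba, Bembé, Bembé_2, Soli, Sorsonet, Tambú, Tonada, Yoruba)
--
--     Collectively, they have 3 distinct patterns.
--
--     >>> len(rotation_distinct_patterns(ten_tuples))
--     3
--
--     """
--     return_values = [vector_patterns[0]]  # At least one
--     for index in range(1, len(vector_patterns)):
--         for prototype in return_values:
--             if is_rotation_equivalent(prototype, vector_patterns[index]):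
--                 break
--         else:
--             return_values.append(vector_patterns[index])
--
--     return tuple(return_values)
-- ===== SOURCE B (Python) =====
-- def _canonical(p: tuple) -> tuple:
--     """Canonical representative of p's rotation class: its lexicographically
--     minimal rotation."""
--     n = len(p)
--     doubled = p + p
--     return min((doubled[i:i + n] for i in range(n)), default=p)
--
-- def rotation_distinct_patterns(
--     vector_patterns: tuple[tuple, ...]
-- ) -> tuple[tuple, ...]:
--     result = []
--     seen = set()
--     for p in vector_patterns:
--         key = _canonical(p)
--         if key not in seen:
--             seen.add(key)
--             result.append(p)
--     return tuple(result)
-- ===== Notes on version B (the rewrite author's own statement) =====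
-- stated objective: faster
-- what changed: Instead of comparing each new pattern against every kept prototype with a quadratic rotation-equivalence test, B computes a canonical key per pattern (its lexicographically minimal rotation) once and deduplicates via a hash set of keys, keeping first representatives in order.
import Mathlib
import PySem

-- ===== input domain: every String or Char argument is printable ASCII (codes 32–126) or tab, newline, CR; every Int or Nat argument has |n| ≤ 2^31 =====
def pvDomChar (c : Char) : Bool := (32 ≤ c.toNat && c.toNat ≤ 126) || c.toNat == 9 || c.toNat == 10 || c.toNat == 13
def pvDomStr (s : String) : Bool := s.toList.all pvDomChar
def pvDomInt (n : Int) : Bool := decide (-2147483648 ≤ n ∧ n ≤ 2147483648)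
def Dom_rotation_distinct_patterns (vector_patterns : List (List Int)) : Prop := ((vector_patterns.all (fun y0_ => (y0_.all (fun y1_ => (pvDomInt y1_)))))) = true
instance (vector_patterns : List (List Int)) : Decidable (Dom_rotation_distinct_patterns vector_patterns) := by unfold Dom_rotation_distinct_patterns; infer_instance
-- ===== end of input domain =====

-- B deduplicates via one canonical key (minimal rotation) per pattern and a set of seen keys,
-- instead of A's pairwise rotation-equivalence scan over all kept prototypes.

-- ===== PORT A =====
-- Python raises ValueError when the lengths differ; such inputs are excluded by
-- Pre_rotation_distinct_patterns, so the `false` returned there is unreachable under the claim.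
def is_rotation_equivalent (a b : List Int) : Bool :=
  if a.length ≠ b.length then false
  else
    let doubled := b ++ b
    decide (a.length = 0) ||
      (PySem.List.pyRange 0 (b.length : Int) 1).any
        (fun i => PySem.List.slice doubled (some i) (some (i + (a.length : Int))) == a)

-- vector_patterns[0] raises IndexError on an empty argument (excluded by Pre_); the pyGetD defaults
-- are unreachable under Pre_ (index 0 and 1 ≤ index < len are in range).
def rotation_distinct_patterns (vector_patterns : List (List Int)) : List (List Int) :=
  (PySem.List.pyRange 1 (vector_patterns.length : Int) 1).foldl
    (fun rv index =>
      let pat := PySem.List.pyGetD vector_patterns index []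
      if rv.any (fun prototype => is_rotation_equivalent prototype pat) then rv
      else rv ++ [pat])
    [PySem.List.pyGetD vector_patterns 0 []]

-- ===== PORT B =====
-- Source B's _canonical: the lexicographically minimal rotation (min over doubled slices, default=p).
def canonicalKey (p : List Int) : List Int :=
  PySem.List.minD
    ((PySem.List.pyRange 0 (p.length : Int) 1).map
      (fun i => PySem.List.slice (p ++ p) (some i) (some (i + (p.length : Int)))))
    (fun x => x) p

def rotation_distinct_patterns_alt (vector_patterns : List (List Int)) : List (List Int) :=
  (vector_patterns.foldl
    (fun (st : List (List Int) × PySem.Set (List Int)) p =>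
      let key := canonicalKey p
      if PySem.Set.contains st.2 key then st
      else (st.1 ++ [p], PySem.Set.add st.2 key))
    ([], PySem.Set.empty)).1

-- ===== PRECONDITION & SPEC =====
-- Exactly the inputs on which Python A returns: a nonempty tuple of patterns all of the same length
-- (A raises IndexError on an empty argument and ValueError on patterns of differing lengths).
def Pre_rotation_distinct_patterns (vector_patterns : List (List Int)) : Prop :=
  vector_patterns ≠ [] ∧
    ∀ p ∈ vector_patterns, p.length = vector_patterns.headI.length
instance (vector_patterns : List (List Int)) : Decidable (Pre_rotation_distinct_patterns vector_patterns) := by unfold Pre_rotation_distinct_patterns; infer_instance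

def pvWitness_rotation_distinct_patterns : List (List Int) := [[1, 0, 0], [0, 1, 0], [1, 1, 0]]

def Spec_rotation_distinct_patterns (vector_patterns : List (List Int)) (out : List (List Int)) : Prop := out = rotation_distinct_patterns_alt vector_patterns
instance (vector_patterns : List (List Int)) (out : List (List Int)) : Decidable (Spec_rotation_distinct_patterns vector_patterns out) := by unfold Spec_rotation_distinct_patterns; infer_instance

-- ===== CLAIM (what is proved, stated in full; the proofs are below) =====
def Claim_equal_rotation_distinct_patterns : Prop := ∀ (vector_patterns : List (List Int)), Dom_rotation_distinct_patterns vector_patterns → Pre_rotation_distinct_patterns vector_patterns → Spec_rotation_distinct_patterns vector_patterns (rotation_distinct_patterns vector_patterns)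

-- ===== LEMMAS AND PROOFS =====

-- The list of all rotations of p (empty when p is empty).
def rots (p : List Int) : List (List Int) := (List.range p.length).map (p.rotate ·)

lemma decLT_eq : (fun (a b : List Int) => List.decidableLT a b) = (@LinearOrder.toDecidableLT (List Int) _) := by
  funext a b; exact Subsingleton.elim _ _

lemma slice_double (p : List Int) (k : Nat) (hk : k ≤ p.length) :
    ((p ++ p).drop k).take p.length = p.rotate k := by
  rw [List.rotate_eq_drop_append_take hk]
  rw [List.drop_append_of_le_length hk]
  rw [List.take_append]
  congr 1
  · exact List.take_of_length_le (by simp)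
  · congr 1; simp; omega

lemma slices_eq_rots (p : List Int) :
    (PySem.List.pyRange 0 (p.length : Int) 1).map
      (fun i => PySem.List.slice (p ++ p) (some i) (some (i + (p.length : Int)))) = rots p := by
  rw [PySem.List.pyRange_one]
  simp only [Int.sub_zero, Int.toNat_natCast, List.map_map, rots]
  apply List.map_congr_left
  intro k hk
  simp only [Function.comp_apply, Int.zero_add]
  rw [show ((k : Int) + (p.length : Int)) = ((k + p.length : Nat) : Int) by push_cast; ring]
  rw [PySem.List.slice_natCast]
  rw [show k + p.length - k = p.length by omega]
  exact slice_double p k (le_of_lt (List.mem_range.mp hk))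

lemma mem_rots {p x : List Int} (hp : p ≠ []) : x ∈ rots p ↔ p ~r x := by
  simp only [rots, List.mem_map, List.mem_range]
  constructor
  · rintro ⟨k, -, rfl⟩; exact ⟨k, rfl⟩
  · rintro ⟨n, rfl⟩
    exact ⟨n % p.length, Nat.mod_lt _ (List.length_pos_iff.mpr hp), List.rotate_mod p n⟩

lemma canon_isRotated (p : List Int) : p ~r canonicalKey p := by
  unfold canonicalKey PySem.List.minD
  rw [slices_eq_rots]
  rcases h : PySem.List.min? (rots p) (fun x => x) with _ | m
  · simp only [Option.getD_none]; exact List.IsRotated.refl p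
  · have hm := PySem.List.min?_mem h
    by_cases hp : p = []
    · subst hp; simp [rots] at hm
    · simpa using (mem_rots hp).mp hm

lemma canon_isMin (p : List Int) : ∀ y ∈ rots p, canonicalKey p ≤ y := by
  unfold canonicalKey PySem.List.minD
  rw [slices_eq_rots]
  rcases h : PySem.List.min? (rots p) (fun x => x) with _ | m
  · rw [PySem.List.min?_eq_none_iff] at h
    intro y hy; rw [h] at hy; simp at hy
  · rw [decLT_eq] at h
    simpa using fun y hy => PySem.List.min?_isMin h y hy

lemma canon_eq_iff (a b : List Int) : canonicalKey a = canonicalKey b ↔ a ~r b := by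
  constructor
  · intro h
    exact ((canon_isRotated a).trans (h ▸ List.IsRotated.refl _)).trans (canon_isRotated b).symm
  · intro h
    by_cases ha : a = []
    · subst ha
      have hb : b = [] := by
        have := h.perm.length_eq
        simpa [List.length_eq_zero_iff] using this.symm
      subst hb; rfl
    · have hb : b ≠ [] := by
        intro hb; subst hb
        exact ha (List.length_eq_zero_iff.mp h.perm.length_eq)
      have h1 : canonicalKey a ∈ rots b :=
        (mem_rots hb).mpr (h.symm.trans (canon_isRotated a))
      have h2 : canonicalKey b ∈ rots a :=
        (mem_rots ha).mpr (h.trans (canon_isRotated b))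
      exact le_antisymm (canon_isMin a _ h2) (canon_isMin b _ h1)

lemma is_rot_iff (a b : List Int) : is_rotation_equivalent a b = true ↔ a ~r b := by
  unfold is_rotation_equivalent
  by_cases hlen : a.length = b.length
  · simp only [hlen, ne_eq, not_true_eq_false, ite_false]
    by_cases h0 : a.length = 0
    · have ha : a = [] := List.length_eq_zero_iff.mp h0
      have hb : b = [] := List.length_eq_zero_iff.mp (hlen ▸ h0)
      subst ha; subst hb; simp
    · have hb : b ≠ [] := by
        intro h; subst h; simp only [List.length_nil] at hlen; exact h0 hlen
      rw [decide_eq_false (show ¬ b.length = 0 by omega)]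
      simp only [Bool.false_or, List.any_eq_true, beq_iff_eq]
      constructor
      · rintro ⟨i, hi, hslice⟩
        rw [PySem.List.mem_pyRange_one] at hi
        obtain ⟨hi0, hib⟩ := hi
        set k := i.toNat with hk
        have hik : i = (k : Int) := (Int.toNat_of_nonneg hi0).symm
        rw [hik] at hslice
        rw [show ((k : Int) + (b.length : Int)) = ((k + b.length : Nat) : Int) by push_cast; ring] at hslice
        rw [PySem.List.slice_natCast] at hslice
        rw [show k + b.length - k = b.length by omega] at hslice
        rw [slice_double b k (by omega)] at hslice
        have : b.rotate k = a := by simpa using hslice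
        exact (List.IsRotated.symm ⟨k, this⟩)
      · intro h
        have : a ∈ rots b := (mem_rots hb).mpr h.symm
        simp only [rots, List.mem_map, List.mem_range] at this
        obtain ⟨k, hkb, hrot⟩ := this
        refine ⟨(k : Int), ?_, ?_⟩
        · rw [PySem.List.mem_pyRange_one]; constructor <;> [positivity; exact_mod_cast hkb]
        · rw [show ((k : Int) + (b.length : Int)) = ((k + b.length : Nat) : Int) by push_cast; ring,
              PySem.List.slice_natCast, show k + b.length - k = b.length by omega,
              slice_double b k (by omega), hrot]
  · simp only [ne_eq, hlen, not_false_eq_true, if_pos]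
    constructor
    · intro h; cases h
    · intro h; exact absurd h.perm.length_eq hlen

lemma fold_eq (rest : List (List Int)) :
    ∀ (acc : List (List Int)) (seen : PySem.Set (List Int)),
      (∀ key, key ∈ seen ↔ ∃ q ∈ acc, canonicalKey q = key) →
      rest.foldl
        (fun rv pat =>
          if rv.any (fun prototype => is_rotation_equivalent prototype pat) then rv
          else rv ++ [pat]) acc
      = (rest.foldl
          (fun (st : List (List Int) × PySem.Set (List Int)) p =>
            let key := canonicalKey p
            if PySem.Set.contains st.2 key then st
            else (st.1 ++ [p], PySem.Set.add st.2 key)) (acc, seen)).1 := by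
  induction rest with
  | nil => intro acc seen _; rfl
  | cons p rest ih =>
    intro acc seen hinv
    simp only [List.foldl_cons]
    have hcond : (PySem.Set.contains seen (canonicalKey p)) =
        acc.any (fun prototype => is_rotation_equivalent prototype p) := by
      rcases h : acc.any (fun prototype => is_rotation_equivalent prototype p) with _ | _
      · rw [Bool.eq_false_iff]
        intro hc
        rw [PySem.Set.contains_iff] at hc
        obtain ⟨q, hq, hcanon⟩ := (hinv _).mp hc
        rw [List.any_eq_false] at h
        exact (h q hq) ((is_rot_iff q p).mpr ((canon_eq_iff q p).mp hcanon))
      · rw [List.any_eq_true] at h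
        obtain ⟨q, hq, hrot⟩ := h
        rw [PySem.Set.contains_iff]
        exact (hinv _).mpr ⟨q, hq, (canon_eq_iff q p).mpr ((is_rot_iff q p).mp hrot)⟩
    rcases hc : acc.any (fun prototype => is_rotation_equivalent prototype p) with _ | _
    · rw [hc] at hcond
      simp only [hcond, Bool.false_eq_true, ite_false]
      apply ih
      intro key
      rw [PySem.Set.mem_add]
      constructor
      · rintro (hk | rfl)
        · obtain ⟨q, hq, hc2⟩ := (hinv key).mp hk
          exact ⟨q, List.mem_append_left _ hq, hc2⟩
        · exact ⟨p, List.mem_append_right _ (List.mem_singleton_self p), rfl⟩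
      · rintro ⟨q, hq, hc2⟩
        rcases List.mem_append.mp hq with hq | hq
        · exact Or.inl ((hinv key).mpr ⟨q, hq, hc2⟩)
        · rw [List.mem_singleton] at hq; subst hq; exact Or.inr hc2.symm
    · rw [hc] at hcond
      simp only [hcond, ite_true]
      exact ih acc seen hinv

-- ===== VERDICT (by name: the statement is the Claim_ definition above) =====
theorem rotation_distinct_patterns_spec : Claim_equal_rotation_distinct_patterns := by
  intro vp _hdom hpre
  unfold Spec_rotation_distinct_patterns
  obtain ⟨v0, t, rfl⟩ : ∃ v0 t, vp = v0 :: t := by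
    cases vp with
    | nil => exact absurd rfl hpre.1
    | cons v0 t => exact ⟨v0, t, rfl⟩
  have hA : rotation_distinct_patterns (v0 :: t)
      = t.foldl
          (fun rv pat =>
            if rv.any (fun prototype => is_rotation_equivalent prototype pat) then rv
            else rv ++ [pat]) [v0] := by
    unfold rotation_distinct_patterns
    rw [show PySem.List.pyGetD (v0 :: t) (0 : Int) ([] : List Int) = v0 from by simp [pysem]]
    exact PySem.List.foldl_pyRange_pyGetD' (v0 :: t) []
      (fun rv pat =>
        if rv.any (fun prototype => is_rotation_equivalent prototype pat) then rv
        else rv ++ [pat]) [v0] (a := 1) (by norm_num)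
  have hB : rotation_distinct_patterns_alt (v0 :: t)
      = (t.foldl
          (fun (st : List (List Int) × PySem.Set (List Int)) p =>
            let key := canonicalKey p
            if PySem.Set.contains st.2 key then st
            else (st.1 ++ [p], PySem.Set.add st.2 key))
          ([v0], PySem.Set.add PySem.Set.empty (canonicalKey v0))).1 := rfl
  rw [hA, hB]
  apply fold_eq
  intro key
  rw [PySem.Set.mem_add]
  simp only [PySem.Set.empty, List.not_mem_nil, false_or, List.mem_singleton]
  constructor
  · rintro rfl; exact ⟨v0, rfl, rfl⟩
  · rintro ⟨q, rfl, rfl⟩; rfl
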